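-- pv_equiv track=rewrite | github.com/afaranda/BINF685_Project | CAS_Edge_Overlap.py | threeway
-- ===== SOURCE A (Python) =====
-- def threeway(E1, E2, E3, filename="inx.csv", count=True):
--     results = {
--         'E1-E2uE3': E1.difference(E2.union(E3)),
--         'E2-E1uE3': E2.difference(E1.union(E3)),
--         'E3-E1uE2': E3.difference(E1.union(E2)),
--         'E1iE2-E3': E1.intersection(E2).difference(E3),
--         'E1iE3-E2': E1.intersection(E3).difference(E2),
--         'E2iE3-E1': E2.intersection(E3).difference(E1),
--         'E1iE2iE3': E1.intersection(E2).intersection(E3)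
--     }
--     if count:
--         return {i:len(results[i]) for i in results.keys()}
--     else:
--         return results
-- ===== SOURCE B (Python) =====
-- def threeway(E1, E2, E3, filename="inx.csv", count=True):
--     keys = ('E1-E2uE3', 'E2-E1uE3', 'E3-E1uE2',
--             'E1iE2-E3', 'E1iE3-E2', 'E2iE3-E1', 'E1iE2iE3')
--     mask = {
--         (True, False, False): 'E1-E2uE3',
--         (False, True, False): 'E2-E1uE3',
--         (False, False, True): 'E3-E1uE2',
--         (True, True, False): 'E1iE2-E3',
--         (True, False, True): 'E1iE3-E2',
--         (False, True, True): 'E2iE3-E1',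
--         (True, True, True): 'E1iE2iE3',
--     }
--     U = E1 | E2 | E3
--
--     def sig(x):
--         return mask[(x in E1, x in E2, x in E3)]
--
--     if count:
--         labels = [sig(x) for x in U]
--         return {k: labels.count(k) for k in keys}
--     return {k: {x for x in U if sig(x) == k} for k in keys}
-- ===== Notes on version B (the rewrite author's own statement) =====
-- stated objective: alternative
-- what changed: Instead of seven separate set-algebra expressions (difference/union/intersection per region), B makes one pass over the union, labels each element with its membership signature (x in E1, x in E2, x in E3) via a mask table, and derives each region's count (or set) from the labels.
import Mathlib
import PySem

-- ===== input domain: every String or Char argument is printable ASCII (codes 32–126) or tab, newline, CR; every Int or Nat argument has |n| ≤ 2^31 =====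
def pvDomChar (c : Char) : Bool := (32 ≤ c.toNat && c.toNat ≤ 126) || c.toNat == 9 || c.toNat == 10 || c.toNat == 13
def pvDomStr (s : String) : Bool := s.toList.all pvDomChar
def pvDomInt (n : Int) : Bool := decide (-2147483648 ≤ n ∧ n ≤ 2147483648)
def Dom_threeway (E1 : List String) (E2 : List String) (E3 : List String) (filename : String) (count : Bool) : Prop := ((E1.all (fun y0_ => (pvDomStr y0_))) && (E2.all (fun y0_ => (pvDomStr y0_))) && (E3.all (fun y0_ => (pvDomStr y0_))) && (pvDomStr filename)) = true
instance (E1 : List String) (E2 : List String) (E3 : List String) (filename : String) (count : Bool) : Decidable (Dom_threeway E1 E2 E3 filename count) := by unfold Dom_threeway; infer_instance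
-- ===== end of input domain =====

-- B replaces A's seven set-algebra expressions by a single labelling pass over the union E1|E2|E3
-- (membership-signature mask table), then reads each region off the label list (objective: alternative).
-- Equivalence is claimed for count=True only (count=False returns a dict of SETS, not of ints).

-- ===== PORT A =====
-- A builds the dict 'results' of seven region sets, then (count=True) the dict {key: len(set)}.
-- count=False returns a dict of sets — not a value of type List (String × Int); excluded by Pre_,
-- the port returns [] there.
def threeway (E1 : List String) (E2 : List String) (E3 : List String) (filename : String) (count : Bool) : List (String × Int) :=
  let results : List (String × List String) :=
    [("E1-E2uE3", PySem.Set.diff E1 (PySem.Set.union E2 E3)),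
     ("E2-E1uE3", PySem.Set.diff E2 (PySem.Set.union E1 E3)),
     ("E3-E1uE2", PySem.Set.diff E3 (PySem.Set.union E1 E2)),
     ("E1iE2-E3", PySem.Set.diff (PySem.Set.inter E1 E2) E3),
     ("E1iE3-E2", PySem.Set.diff (PySem.Set.inter E1 E3) E2),
     ("E2iE3-E1", PySem.Set.diff (PySem.Set.inter E2 E3) E1),
     ("E1iE2iE3", PySem.Set.inter (PySem.Set.inter E1 E2) E3)]
  if count then results.map (fun p => (p.1, PySem.Set.len p.2))
  else []

-- ===== PORT B =====
def pvKeys : List String :=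
  ["E1-E2uE3", "E2-E1uE3", "E3-E1uE2", "E1iE2-E3", "E1iE3-E2", "E2iE3-E1", "E1iE2iE3"]

def pvMask : PySem.Dict (Bool × Bool × Bool) String :=
  PySem.Dict.ofList
    [((true, false, false), "E1-E2uE3"),
     ((false, true, false), "E2-E1uE3"),
     ((false, false, true), "E3-E1uE2"),
     ((true, true, false), "E1iE2-E3"),
     ((true, false, true), "E1iE3-E2"),
     ((false, true, true), "E2iE3-E1"),
     ((true, true, true), "E1iE2iE3")]

-- sig(x) = mask[(x in E1, x in E2, x in E3)]; Python raises KeyError on (False,False,False),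
-- unreachable for x in the union — getD "" stands in for the unreachable lookup.
def pvSig (E1 E2 E3 : List String) (x : String) : String :=
  PySem.Dict.getD pvMask (PySem.Set.contains E1 x, PySem.Set.contains E2 x, PySem.Set.contains E3 x) ""

-- count=False returns a dict of sets — excluded by Pre_, [] here (as in port A).
def threeway_alt (E1 : List String) (E2 : List String) (E3 : List String) (filename : String) (count : Bool) : List (String × Int) :=
  if count then
    let U := PySem.Set.union (PySem.Set.union E1 E2) E3
    let labels := U.map (pvSig E1 E2 E3)
    pvKeys.map (fun k => (k, (PySem.List.count labels k : Int)))
  else []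

-- ===== PRECONDITION & SPEC =====
-- Pre_ excludes count=False, on which A returns a dict of SETS — not a value of the declared
-- return type List (String × Int); it also states the set-argument convention (E1,E2,E3 are
-- Python sets, so their list representations hold distinct elements).
def Pre_threeway (E1 : List String) (E2 : List String) (E3 : List String) (filename : String) (count : Bool) : Prop :=
  count = true ∧ E1.Nodup ∧ E2.Nodup ∧ E3.Nodup
instance (E1 : List String) (E2 : List String) (E3 : List String) (filename : String) (count : Bool) : Decidable (Pre_threeway E1 E2 E3 filename count) := by unfold Pre_threeway; infer_instance

def pvWitness_threeway : List String × List String × List String × String × Bool :=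
  (["a", "b"], ["b", "c"], ["c"], "inx.csv", true)

def Spec_threeway (E1 : List String) (E2 : List String) (E3 : List String) (filename : String) (count : Bool) (out : List (String × Int)) : Prop := out = threeway_alt E1 E2 E3 filename count
instance (E1 : List String) (E2 : List String) (E3 : List String) (filename : String) (count : Bool) (out : List (String × Int)) : Decidable (Spec_threeway E1 E2 E3 filename count out) := by unfold Spec_threeway; infer_instance

-- ===== CLAIM (what is proved, stated in full; the proofs are below) =====
def Claim_equal_threeway : Prop := ∀ (E1 : List String) (E2 : List String) (E3 : List String) (filename : String) (count : Bool), Dom_threeway E1 E2 E3 filename count → Pre_threeway E1 E2 E3 filename count → Spec_threeway E1 E2 E3 filename count (threeway E1 E2 E3 filename count)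

-- ===== LEMMAS AND PROOFS =====

-- count over the label list is a countP over the union
theorem pv_count_map (U : List String) (f : String → String) (k : String) :
    PySem.List.count (U.map f) k = List.countP (fun x => f x == k) U := by
  simp [PySem.List.count_eq, List.count, List.countP_map]
  rfl

-- a Nodup region set S has the same length as the filter of the Nodup union that shares its members
theorem pv_len_filter (U S : List String) (p : String → Bool) (hU : U.Nodup) (hS : S.Nodup)
    (h : ∀ x, x ∈ S ↔ x ∈ U ∧ p x = true) : S.length = List.countP p U := by
  rw [List.countP_eq_length_filter]
  exact ((List.perm_ext_iff_of_nodup hS (hU.filter p)).mpr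
    (by intro a; rw [List.mem_filter]; exact h a)).length_eq

-- the mask table, read back as nested ifs on the membership booleans
theorem pv_sig_bool (b1 b2 b3 : Bool) :
    PySem.Dict.getD pvMask (b1, b2, b3) "" =
      if b1 = true then
        if b2 = true then (if b3 = true then "E1iE2iE3" else "E1iE2-E3")
        else (if b3 = true then "E1iE3-E2" else "E1-E2uE3")
      else
        if b2 = true then (if b3 = true then "E2iE3-E1" else "E2-E1uE3")
        else (if b3 = true then "E3-E1uE2" else "") := by
  rcases b1 <;> rcases b2 <;> rcases b3 <;> decide

theorem pv_sig_eq (E1 E2 E3 : List String) (x : String) :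
    pvSig E1 E2 E3 x =
      if x ∈ E1 then
        if x ∈ E2 then (if x ∈ E3 then "E1iE2iE3" else "E1iE2-E3")
        else (if x ∈ E3 then "E1iE3-E2" else "E1-E2uE3")
      else
        if x ∈ E2 then (if x ∈ E3 then "E2iE3-E1" else "E2-E1uE3")
        else (if x ∈ E3 then "E3-E1uE2" else "") := by
  unfold pvSig
  rw [pv_sig_bool]
  simp only [PySem.Set.contains_iff]

theorem pv_main (E1 E2 E3 : List String) (h1 : E1.Nodup) (h2 : E2.Nodup) (h3 : E3.Nodup) :
    threeway E1 E2 E3 "x" true = threeway_alt E1 E2 E3 "x" true := by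
  have hU : (PySem.Set.union (PySem.Set.union E1 E2) E3).Nodup :=
    PySem.Set.nodup_union _ _ (PySem.Set.nodup_union _ _ h1)
  have hmem : ∀ x, x ∈ PySem.Set.union (PySem.Set.union E1 E2) E3 ↔ x ∈ E1 ∨ x ∈ E2 ∨ x ∈ E3 := by
    intro x; simp [PySem.Set.mem_union, or_assoc]
  have key : ∀ (S : List String) (k : String), S.Nodup →
      (∀ x, x ∈ S ↔ (x ∈ E1 ∨ x ∈ E2 ∨ x ∈ E3) ∧ pvSig E1 E2 E3 x = k) →
      PySem.Set.len S =
        (PySem.List.count ((PySem.Set.union (PySem.Set.union E1 E2) E3).map (pvSig E1 E2 E3)) k : Int) := by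
    intro S k hS hchar
    rw [pv_count_map]
    have := pv_len_filter _ S (fun x => pvSig E1 E2 E3 x == k) hU hS (by
      intro x; rw [hmem x, hchar x]; simp)
    simp [PySem.Set.len, this]
  show threeway E1 E2 E3 "x" true = threeway_alt E1 E2 E3 "x" true
  simp only [threeway, threeway_alt, pvKeys, if_pos, List.map]
  refine congrArg₂ _ ?_ (congrArg₂ _ ?_ (congrArg₂ _ ?_ (congrArg₂ _ ?_ (congrArg₂ _ ?_
    (congrArg₂ _ ?_ (congrArg₂ _ ?_ rfl)))))) <;>
  · refine congrArg _ ?_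
    apply key _ _ (by
      first
        | exact PySem.Set.nodup_diff _ _ h1
        | exact PySem.Set.nodup_diff _ _ h2
        | exact PySem.Set.nodup_diff _ _ h3
        | exact PySem.Set.nodup_diff _ _ (PySem.Set.nodup_inter _ _ h1)
        | exact PySem.Set.nodup_diff _ _ (PySem.Set.nodup_inter _ _ h2)
        | exact PySem.Set.nodup_inter _ _ (PySem.Set.nodup_inter _ _ h1))
    intro x
    rw [pv_sig_eq]
    by_cases hx1 : x ∈ E1 <;> by_cases hx2 : x ∈ E2 <;> by_cases hx3 : x ∈ E3 <;>
      simp [PySem.Set.mem_diff, PySem.Set.mem_union, PySem.Set.mem_inter, hx1, hx2, hx3]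

-- ===== VERDICT (by name: the statement is the Claim_ definition above) =====
theorem threeway_spec : Claim_equal_threeway := by
  intro E1 E2 E3 filename count _ hpre
  obtain ⟨hc, h1, h2, h3⟩ := hpre
  subst hc
  unfold Spec_threeway
  have := pv_main E1 E2 E3 h1 h2 h3
  simpa [threeway, threeway_alt] using this
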